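-- pv_equiv track=rewrite | github.com/chessrajat/competitive_programming | Code_Gradiators/the_magic_wand.py | magic_wand
-- ===== SOURCE A (Python) =====
-- def magic_wand(n, m, arr, queries):
--     arr.sort()
--     res = []
--     for q in queries:
--         diff = [abs(q - x) for x in arr]
--         diff.sort()
--         cost = [0] * n
--         cost[0] = diff[0]
--         for i in range(1, n):
--             cost[i] = cost[i-1] + diff[i]
--         res.append(cost[-1])
--     return res
-- ===== SOURCE B (Python) =====
-- def magic_wand(n, m, arr, queries):
--     a = sorted(arr)
--     res = []
--     for q in queries:
--         # binary search: first index with a[i] >= q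
--         lo, hi = 0, len(a)
--         while lo < hi:
--             mid = (lo + hi) // 2
--             if a[mid] < q:
--                 lo = mid + 1
--             else:
--                 hi = mid
--         # two pointers outward from the insertion point: the two diff
--         # sequences (leftward q - a[i], rightward a[j] - q) are each
--         # nondecreasing; merge them for n steps, summing the n smallest.
--         i, j = lo - 1, lo
--         total = 0
--         for _ in range(n):
--             if i < 0:
--                 total += a[j] - q
--                 j += 1
--             elif j >= len(a):
--                 total += q - a[i]
--                 i -= 1
--             elif q - a[i] <= a[j] - q:
--                 total += q - a[i]
--                 i -= 1
--             else:
--                 total += a[j] - q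
--                 j += 1
--         res.append(total)
--     return res
-- ===== Notes on version B (the rewrite author's own statement) =====
-- stated objective: alternative
-- what changed: Instead of rebuilding and sorting the |q-x| list for every query, B sorts arr once and, per query, binary-searches the insertion point and merges the two outward nondecreasing difference sequences with two pointers for n steps, summing the n smallest differences directly.
import Mathlib
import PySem

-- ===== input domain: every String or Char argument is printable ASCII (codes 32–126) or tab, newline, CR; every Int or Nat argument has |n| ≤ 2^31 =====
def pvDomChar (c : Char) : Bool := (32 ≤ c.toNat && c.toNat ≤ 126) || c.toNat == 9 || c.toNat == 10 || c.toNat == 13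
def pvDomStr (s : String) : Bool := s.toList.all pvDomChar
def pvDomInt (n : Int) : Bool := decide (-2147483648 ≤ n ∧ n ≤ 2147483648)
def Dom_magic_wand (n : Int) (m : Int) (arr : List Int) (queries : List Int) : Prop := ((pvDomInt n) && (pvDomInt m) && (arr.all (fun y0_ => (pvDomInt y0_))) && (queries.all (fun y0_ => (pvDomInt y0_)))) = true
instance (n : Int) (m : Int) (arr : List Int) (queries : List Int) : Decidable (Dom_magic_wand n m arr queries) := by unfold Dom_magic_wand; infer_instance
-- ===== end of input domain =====

-- B replaces A's per-query rebuild-and-sort of the |q-x| list by one sort of arr plus, per query,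
-- a binary search and a two-pointer merge of the outward difference sequences (alternative algorithm;
-- A sorts arr in place, B does not — the equivalence proved here is about the return value only).

-- ===== PORT A =====
-- loop body of A's 'for q in queries' (kept as a helper for readability; literal transliteration)
def aQuery (n : Int) (q : Int) (a : List Int) : Int :=
  let diff := a.map (fun x => |q - x|)            -- [abs(q - x) for x in arr]
  let diff := PySem.List.sorted diff (fun x => x) false   -- diff.sort()
  let cost := PySem.List.pyRepeat [(0 : Int)] n           -- cost = [0] * n
  let cost := PySem.List.pySetD cost 0 (PySem.List.pyGetD diff 0 0)   -- cost[0] = diff[0]  (in range under Pre_)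
  let cost := (PySem.List.pyRange 1 n 1).foldl            -- for i in range(1, n)
      (fun cost i => PySem.List.pySetD cost i (PySem.List.pyGetD cost (i - 1) 0 + PySem.List.pyGetD diff i 0)) cost
  PySem.List.pyGetD cost (-1) 0                           -- cost[-1]  (nonempty under Pre_)

def magic_wand (n : Int) (m : Int) (arr : List Int) (queries : List Int) : List Int :=
  let a := PySem.List.sorted arr (fun x => x) false       -- arr.sort()
  queries.foldl (fun res q => res ++ [aQuery n q a]) []   -- res.append(...)

-- ===== PORT B =====
-- hand-written binary search of Source B (a[mid] is in range inside the loop, so getD is exact)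
def bSearch (a : List Int) (q : Int) (lo hi : Nat) : Nat :=
  if h : lo < hi then
    let mid := (lo + hi) / 2
    if a.getD mid 0 < q then bSearch a q (mid + 1) hi else bSearch a q lo mid
  else lo
termination_by hi - lo
decreasing_by all_goals omega

-- loop body of B's 'for _ in range(n)' (the three-way branch of Source B, step for step)
def bStep (a : List Int) (q : Int) (st : Int × Int × Int) : Int × Int × Int :=
  let i := st.1
  let j := st.2.1
  let total := st.2.2
  if i < 0 then (i, j + 1, total + (PySem.List.pyGetD a j 0 - q))
  else if (a.length : Int) ≤ j then (i - 1, j, total + (q - PySem.List.pyGetD a i 0))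
  else if q - PySem.List.pyGetD a i 0 ≤ PySem.List.pyGetD a j 0 - q then
    (i - 1, j, total + (q - PySem.List.pyGetD a i 0))
  else (i, j + 1, total + (PySem.List.pyGetD a j 0 - q))

-- loop body of B's 'for q in queries'
def bQuery (n : Int) (q : Int) (a : List Int) : Int :=
  let lo := bSearch a q 0 a.length
  (((PySem.List.pyRange 0 n 1).foldl (fun st _ => bStep a q st)
      ((lo : Int) - 1, (lo : Int), (0 : Int)))).2.2

def magic_wand_alt (n : Int) (m : Int) (arr : List Int) (queries : List Int) : List Int :=
  let a := PySem.List.sorted arr (fun x => x) false       -- a = sorted(arr)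
  queries.foldl (fun res q => res ++ [bQuery n q a]) []

-- ===== PRECONDITION & SPEC =====
-- Pre_ excludes exactly the inputs where A raises IndexError: with a nonempty query list,
-- n < 1 (cost[0] out of range) or n > len(arr) (diff[i] out of range in the cost loop).
def Pre_magic_wand (n : Int) (m : Int) (arr : List Int) (queries : List Int) : Prop :=
  queries = [] ∨ (1 ≤ n ∧ n ≤ (arr.length : Int))
instance (n : Int) (m : Int) (arr : List Int) (queries : List Int) : Decidable (Pre_magic_wand n m arr queries) := by unfold Pre_magic_wand; infer_instance

def pvWitness_magic_wand : Int × Int × List Int × List Int := (2, 0, [3, 1], [2])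

def Spec_magic_wand (n : Int) (m : Int) (arr : List Int) (queries : List Int) (out : List Int) : Prop := out = magic_wand_alt n m arr queries
instance (n : Int) (m : Int) (arr : List Int) (queries : List Int) (out : List Int) : Decidable (Spec_magic_wand n m arr queries out) := by unfold Spec_magic_wand; infer_instance

-- ===== CLAIM (what is proved, stated in full; the proofs are below) =====
def Claim_equal_magic_wand : Prop := ∀ (n : Int) (m : Int) (arr : List Int) (queries : List Int), Dom_magic_wand n m arr queries → Pre_magic_wand n m arr queries → Spec_magic_wand n m arr queries (magic_wand n m arr queries)

-- ===== LEMMAS AND PROOFS =====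

-- merging for sums: sum of the first N elements of the merge of two lists
def mergeSum : Nat → List Int → List Int → Int
  | 0, _, _ => 0
  | _ + 1, [], [] => 0
  | k + 1, [], y :: R => y + mergeSum k [] R
  | k + 1, x :: L, [] => x + mergeSum k L []
  | k + 1, x :: L, y :: R =>
      if x ≤ y then x + mergeSum k L (y :: R) else y + mergeSum k (x :: L) R

theorem mergeSum_eq_sum_take (N : Nat) (L R : List Int) :
    mergeSum N L R = ((L.merge R (fun x y => decide (x ≤ y))).take N).sum := by
  fun_induction mergeSum N L R with
  | case1 => simp
  | case2 => simp
  | case3 k y R ih => simp [List.nil_merge] at ih ⊢; omega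
  | case4 k x L ih => simp [List.merge_right] at ih ⊢; omega
  | case5 k x L y R hxy ih => rw [List.merge, if_pos (by simpa using hxy)]; simp [ih]
  | case6 k x L y R hxy ih => rw [List.merge, if_neg (by simpa using hxy)]; simp [ih]

theorem foldl_const {α β : Type} (g : α → α) (l : List β) (init : α) :
    l.foldl (fun s _ => g s) init = g^[l.length] init := by
  induction l generalizing init with
  | nil => rfl
  | cons x t ih => simpa [Function.iterate_succ_apply] using ih (g init)

theorem bSearch_spec (a : List Int) (q : Int) (ha : a.Pairwise (· ≤ ·)) :
    ∀ (lo hi : Nat), lo ≤ hi → hi ≤ a.length →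
    (∀ i, i < lo → a.getD i 0 < q) → (∀ i, hi ≤ i → i < a.length → q ≤ a.getD i 0) →
    bSearch a q lo hi ≤ a.length ∧
    (∀ i, i < bSearch a q lo hi → a.getD i 0 < q) ∧
    (∀ i, bSearch a q lo hi ≤ i → i < a.length → q ≤ a.getD i 0) := by
  have hmono : ∀ i j, i ≤ j → j < a.length → a.getD i 0 ≤ a.getD j 0 := by
    intro i j hij hj
    rcases Nat.lt_or_ge i j with h | h
    · rw [List.getD_eq_getElem _ _ (by omega), List.getD_eq_getElem _ _ hj]
      exact List.pairwise_iff_getElem.mp ha i j (by omega) hj h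
    · have : i = j := by omega
      subst this; rfl
  intro lo hi
  fun_induction bSearch a q lo hi with
  | case1 lo hi hlh mid hmid ih =>
    intro h1 h2 hlo hhi
    exact ih (by omega) h2
      (fun i hi => lt_of_le_of_lt (hmono i mid (by omega) (by omega)) hmid) hhi
  | case2 lo hi hlh mid hmid ih =>
    intro h1 h2 hlo hhi
    exact ih (by omega) (by omega) hlo
      (fun i hmi hil => le_trans (not_lt.mp hmid) (hmono mid i (by omega) hil))
  | case3 lo hi hlh =>
    intro h1 h2 hlo hhi
    exact ⟨by omega, hlo, fun i hli hil => hhi i (by omega) hil⟩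

theorem costLoop (d : List Int) (N : Nat) (hN : N ≤ d.length) :
    ∀ (t k : Nat) (cost : List Int), 1 ≤ k → k + t = N → cost.length = N →
      cost.getD (k - 1) 0 = (d.take k).sum →
      (((PySem.List.pyRange (k : Int) (N : Int) 1).foldl
          (fun cost i => PySem.List.pySetD cost i
            (PySem.List.pyGetD cost (i - 1) 0 + PySem.List.pyGetD d i 0)) cost).length = N ∧
       ((PySem.List.pyRange (k : Int) (N : Int) 1).foldl
          (fun cost i => PySem.List.pySetD cost i
            (PySem.List.pyGetD cost (i - 1) 0 + PySem.List.pyGetD d i 0)) cost).getD (N - 1) 0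
         = (d.take N).sum) := by
  intro t
  induction t with
  | zero =>
    intro k cost hk1 hkN hlen hinv
    have hkN' : k = N := by omega
    subst hkN'
    rw [PySem.List.pyRange_one_eq_nil (by omega)]
    simpa [hlen] using hinv
  | succ t ih =>
    intro k cost hk1 hkN hlen hinv
    have hklt : k < N := by omega
    have hkd : k < d.length := by omega
    rw [PySem.List.pyRange_one_cons (by exact_mod_cast hklt), List.foldl_cons]
    have hcast : ((k : Int)) + 1 = ((k + 1 : Nat) : Int) := by push_cast; ring
    rw [hcast]
    have hk1' : ((k : Int)) - 1 = ((k - 1 : Nat) : Int) := by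
      have : 1 ≤ k := hk1; push_cast [this]; ring
    apply ih (k + 1) _ (by omega) (by omega)
    · simp [PySem.List.pySetD_natCast, hlen]
    · rw [PySem.List.pySetD_natCast]
      rw [List.getD_eq_getElem _ _ (by simp [hlen]; omega)]
      show (cost.set k _)[k + 1 - 1]'_ = _
      have hgoal : (cost.set k (PySem.List.pyGetD cost ((k : Int) - 1) 0 + PySem.List.pyGetD d (k : Int) 0))[k + 1 - 1]'(by simp [hlen]; omega)
          = PySem.List.pyGetD cost ((k : Int) - 1) 0 + PySem.List.pyGetD d (k : Int) 0 := by
        simp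
      rw [hgoal, hk1', PySem.List.pyGetD_natCast, PySem.List.pyGetD_natCast, hinv]
      rw [List.sum_take_succ d k hkd]
      congr 1
      exact List.getD_eq_getElem _ _ hkd

theorem aQuery_eq (n : Int) (q : Int) (a : List Int) (hn1 : 1 ≤ n) (hn2 : n ≤ (a.length : Int)) :
    aQuery n q a =
      ((PySem.List.sorted (a.map (fun x => |q - x|)) (fun x => x) false).take n.toNat).sum := by
  set d := PySem.List.sorted (a.map (fun x => |q - x|)) (fun x => x) false with hd
  have hdlen : d.length = a.length := by simp [hd, PySem.List.length_sorted]
  set N := n.toNat with hNdef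
  have hN1 : 1 ≤ N := by omega
  have hNlen : N ≤ d.length := by omega
  have hcastn : n = (N : Int) := by omega
  unfold aQuery
  dsimp only
  rw [← hd, hcastn, PySem.List.pyRepeat_singleton]
  have hNtoNat : ((N : Int)).toNat = N := by omega
  rw [hNtoNat]
  have hd0 : PySem.List.pyGetD d 0 0 = d.getD 0 0 := by
    have h : (0 : Int) = ((0 : Nat) : Int) := by norm_num
    rw [h, PySem.List.pyGetD_natCast]
  have hset : PySem.List.pySetD (List.replicate N (0 : Int)) 0 (PySem.List.pyGetD d 0 0)
      = (List.replicate N (0 : Int)).set 0 (d.getD 0 0) := by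
    rw [hd0]
    have h : (0 : Int) = ((0 : Nat) : Int) := by norm_num
    rw [h, PySem.List.pySetD_natCast]
  rw [hset]
  have hrange : PySem.List.pyRange 1 ((N : Nat) : Int) 1
      = PySem.List.pyRange (((1 : Nat)) : Int) ((N : Nat) : Int) 1 := by norm_num
  rw [hrange]
  have h0d : 0 < d.length := by omega
  have htake1 : (d.take 1).sum = d.getD 0 0 := by
    rw [List.getD_eq_getElem _ _ h0d]
    simpa using List.sum_take_succ d 0 h0d
  obtain ⟨hlenF, hvalF⟩ := costLoop d N hNlen (N - 1) 1
    ((List.replicate N (0 : Int)).set 0 (d.getD 0 0))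
    (le_refl 1) (by omega) (by simp)
    (by
      rw [List.getD_eq_getElem _ _ (by simp; omega)]
      simp [htake1])
  set costF := (PySem.List.pyRange ((1 : Nat) : Int) ((N : Nat) : Int) 1).foldl
      (fun cost i => PySem.List.pySetD cost i
        (PySem.List.pyGetD cost (i - 1) 0 + PySem.List.pyGetD d i 0))
      ((List.replicate N (0 : Int)).set 0 (d.getD 0 0)) with hcostF
  have hne : costF ≠ [] := by
    intro h; rw [h] at hlenF; simp at hlenF; omega
  rw [PySem.List.pyGetD_neg_one costF 0 hne, List.getLast_eq_getElem]
  rw [← hvalF, List.getD_eq_getElem _ _ (by omega)]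
  congr 1 <;> omega

theorem foldTwoPtr (a : List Int) (q : Int) :
    ∀ (N u j : Nat) (t : Int), u ≤ j → j ≤ a.length → N ≤ u + (a.length - j) →
    ((bStep a q)^[N] (((u : Int) - 1), ((j : Int)), t)).2.2
      = t + mergeSum N ((a.take u).reverse.map (fun x => q - x))
                       ((a.drop j).map (fun x => x - q)) := by
  intro N
  induction N with
  | zero => intro u j t _ _ _; simp [mergeSum]
  | succ N ih =>
    intro u j t huj hjl hN
    rw [Function.iterate_succ_apply]
    rcases Nat.eq_zero_or_pos u with hu0 | hu1
    · -- left side exhausted: take from the right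
      subst hu0
      have hjlen : j < a.length := by omega
      have hstep : bStep a q (((0 : Nat) : Int) - 1, ((j : Int)), t)
          = ((((0 : Nat) : Int) - 1), (((j + 1 : Nat) : Int)), t + (a[j] - q)) := by
        have hgj : PySem.List.pyGetD a ((j : Int)) 0 = a[j] := by
          rw [PySem.List.pyGetD_natCast, List.getD_eq_getElem _ _ hjlen]
        simp only [bStep]
        rw [hgj, if_pos (by norm_num : ((0 : Nat) : Int) - 1 < 0)]
        push_cast
        rfl
      rw [hstep, ih 0 (j + 1) _ (by omega) (by omega) (by omega)]
      rw [List.take_zero, List.reverse_nil, List.map_nil]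
      conv_rhs => rw [← List.getElem_cons_drop hjlen]
      rw [List.map_cons]
      rw [show mergeSum (N + 1) [] ((a[j] - q) :: ((a.drop (j + 1)).map (fun x => x - q)))
            = (a[j] - q) + mergeSum N [] ((a.drop (j + 1)).map (fun x => x - q)) from rfl]
      ring
    · -- left head exists: x = q - a[u-1]
      have hu1l : u - 1 < a.length := by omega
      have hcastu : ((u : Int)) - 1 = ((u - 1 : Nat) : Int) := by push_cast [hu1]; ring
      have hgetu : PySem.List.pyGetD a ((u : Int) - 1) 0 = a[u - 1] := by
        rw [hcastu, PySem.List.pyGetD_natCast, List.getD_eq_getElem _ _ hu1l]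
      have htk' : a.take u = a.take (u - 1) ++ [a[u - 1]] := by
        conv_lhs => rw [show u = (u - 1) + 1 by omega]
        rw [List.take_succ, List.getElem?_eq_getElem hu1l]
        rfl
      have htk : (a.take u).reverse.map (fun x => q - x)
          = (q - a[u - 1]) :: ((a.take (u - 1)).reverse.map (fun x => q - x)) := by
        rw [htk', List.reverse_append, List.reverse_singleton, List.singleton_append,
            List.map_cons]
      have hnotneg : ¬ ((u : Int) - 1 < 0) := by omega
      rcases Nat.eq_or_lt_of_le hjl with hje | hjlt
      -- j = a.length: right side exhausted
      · have hstep : bStep a q (((u : Int) - 1), ((j : Int)), t)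
            = ((((u - 1 : Nat) : Int) - 1), ((j : Int)), t + (q - a[u - 1])) := by
          simp only [bStep]
          rw [hgetu, if_neg hnotneg, if_pos (by omega : (a.length : Int) ≤ (j : Int)), hcastu]
        rw [hstep, ih (u - 1) j _ (by omega) (by omega) (by omega)]
        rw [htk, hje, List.drop_length, List.map_nil]
        rw [show mergeSum (N + 1) ((q - a[u - 1]) :: ((a.take (u - 1)).reverse.map (fun x => q - x))) []
              = (q - a[u - 1]) + mergeSum N ((a.take (u - 1)).reverse.map (fun x => q - x)) [] from rfl]
        ring
      -- both sides nonempty: compare heads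
      · have hgetj : PySem.List.pyGetD a ((j : Int)) 0 = a[j] := by
          rw [PySem.List.pyGetD_natCast, List.getD_eq_getElem _ _ hjlt]
        have hdr : (a.drop j).map (fun x => x - q)
            = (a[j] - q) :: ((a.drop (j + 1)).map (fun x => x - q)) := by
          rw [← List.getElem_cons_drop hjlt, List.map_cons]
        have hnotlen : ¬ ((a.length : Int) ≤ (j : Int)) := by exact_mod_cast not_le.mpr hjlt
        rw [htk, hdr]
        by_cases hcmp : q - a[u - 1] ≤ a[j] - q
        · have hstep : bStep a q (((u : Int) - 1), ((j : Int)), t)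
              = ((((u - 1 : Nat) : Int) - 1), ((j : Int)), t + (q - a[u - 1])) := by
            simp only [bStep]
            rw [hgetu, hgetj, if_neg hnotneg, if_neg hnotlen, if_pos hcmp, hcastu]
          rw [hstep, ih (u - 1) j _ (by omega) (by omega) (by omega)]
          rw [show mergeSum (N + 1) ((q - a[u - 1]) :: ((a.take (u - 1)).reverse.map (fun x => q - x)))
                    ((a[j] - q) :: ((a.drop (j + 1)).map (fun x => x - q)))
                = if q - a[u - 1] ≤ a[j] - q then
                    (q - a[u - 1]) + mergeSum N ((a.take (u - 1)).reverse.map (fun x => q - x))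
                      ((a[j] - q) :: ((a.drop (j + 1)).map (fun x => x - q)))
                  else (a[j] - q) + mergeSum N ((q - a[u - 1]) :: ((a.take (u - 1)).reverse.map (fun x => q - x)))
                      ((a.drop (j + 1)).map (fun x => x - q)) from rfl, if_pos hcmp, hdr]
          ring
        · have hstep : bStep a q (((u : Int) - 1), ((j : Int)), t)
              = (((u : Int) - 1), (((j + 1 : Nat) : Int)), t + (a[j] - q)) := by
            simp only [bStep]
            rw [hgetu, hgetj, if_neg hnotneg, if_neg hnotlen, if_neg hcmp]
            push_cast
            rfl
          rw [hstep, ih u (j + 1) _ (by omega) (by omega) (by omega)]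
          rw [show mergeSum (N + 1) ((q - a[u - 1]) :: ((a.take (u - 1)).reverse.map (fun x => q - x)))
                    ((a[j] - q) :: ((a.drop (j + 1)).map (fun x => x - q)))
                = if q - a[u - 1] ≤ a[j] - q then
                    (q - a[u - 1]) + mergeSum N ((a.take (u - 1)).reverse.map (fun x => q - x))
                      ((a[j] - q) :: ((a.drop (j + 1)).map (fun x => x - q)))
                  else (a[j] - q) + mergeSum N ((q - a[u - 1]) :: ((a.take (u - 1)).reverse.map (fun x => q - x)))
                      ((a.drop (j + 1)).map (fun x => x - q)) from rfl, if_neg hcmp, htk]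
          ring

theorem bQuery_eq (n : Int) (q : Int) (a : List Int) (ha : a.Pairwise (· ≤ ·))
    (hn1 : 1 ≤ n) (hn2 : n ≤ (a.length : Int)) :
    bQuery n q a =
      ((PySem.List.sorted (a.map (fun x => |q - x|)) (fun x => x) false).take n.toNat).sum := by
  obtain ⟨hp1, hp2, hp3⟩ := bSearch_spec a q ha 0 a.length (by omega) (le_refl _)
    (by omega) (by omega)
  set pos := bSearch a q 0 a.length with hpos
  set N := n.toNat with hN
  set L := (a.take pos).reverse.map (fun x => q - x) with hL
  set R := (a.drop pos).map (fun x => x - q) with hR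
  -- B's fold computes mergeSum N L R
  unfold bQuery
  dsimp only
  rw [foldl_const, PySem.List.length_pyRange_one, ← hpos]
  have hNn : (n - 0).toNat = N := by omega
  rw [hNn, foldTwoPtr a q N pos pos 0 (le_refl _) hp1 (by omega), zero_add,
      ← hL, ← hR, mergeSum_eq_sum_take]
  -- the merge of L and R is exactly sorted([abs(q-x) for x in a])
  have habsL : ∀ x ∈ (a.take pos).reverse, q - x = |q - x| := by
    intro x hx
    rw [List.mem_reverse, List.mem_take_iff_getElem] at hx
    obtain ⟨i, hi, he⟩ := hx
    have hia : i < a.length := by omega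
    have hlt : a.getD i 0 < q := hp2 i (by omega)
    rw [List.getD_eq_getElem _ _ hia] at hlt
    have : x < q := by rw [← he]; exact hlt
    rw [abs_of_nonneg (by omega)]
  have habsR' : ∀ x ∈ a.drop pos, x - q = |q - x| := by
    intro x hx
    rw [List.mem_iff_getElem] at hx
    obtain ⟨i, hi, he⟩ := hx
    have hia : pos + i < a.length := by simp at hi; omega
    have hge : q ≤ a.getD (pos + i) 0 := hp3 (pos + i) (by omega) hia
    rw [List.getD_eq_getElem _ _ hia] at hge
    rw [List.getElem_drop] at he
    have : q ≤ x := by rw [← he]; exact hge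
    rw [abs_of_nonpos (by omega)]; ring
  have hperm : (L.merge R (fun x y => decide (x ≤ y))).Perm (a.map (fun x => |q - x|)) := by
    refine (List.merge_perm_append _).trans ?_
    have hLe : L = (a.take pos).reverse.map (fun x => |q - x|) :=
      List.map_congr_left habsL
    have hRe : R = (a.drop pos).map (fun x => |q - x|) :=
      List.map_congr_left habsR'
    rw [hLe, hRe, ← List.map_append]
    have hp : ((a.take pos).reverse ++ a.drop pos).Perm a := by
      refine (List.Perm.append_right _ (List.reverse_perm _)).trans ?_
      rw [List.take_append_drop]
    exact hp.map _
  have hLp : L.Pairwise (· ≤ ·) := by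
    rw [hL, List.pairwise_map]
    have h1 : (a.take pos).Pairwise (· ≤ ·) :=
      List.Pairwise.sublist (List.take_sublist _ _) ha
    have h2 : ((a.take pos).reverse).Pairwise (fun x y => y ≤ x) :=
      List.pairwise_reverse.mpr h1
    exact h2.imp (fun h => by omega)
  have hRp : R.Pairwise (· ≤ ·) := by
    rw [hR, List.pairwise_map]
    exact (List.Pairwise.sublist (List.drop_sublist _ _) ha).imp (fun h => by omega)
  have hmp : (L.merge R (fun x y => decide (x ≤ y))).Pairwise (· ≤ ·) :=
    List.Pairwise.merge hLp hRp
  rw [PySem.List.sorted_id_eq_of_perm_of_pairwise _ _ hperm hmp]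

-- ===== VERDICT (by name: the statement is the Claim_ definition above) =====
theorem magic_wand_spec : Claim_equal_magic_wand := by
  intro n m arr queries _ hpre
  unfold Spec_magic_wand magic_wand magic_wand_alt
  rcases hpre with h | ⟨hn1, hn2⟩
  · subst h; rfl
  · have ha := PySem.List.sorted_pairwise arr (fun x => x)
    have hlen : ((PySem.List.sorted arr (fun x => x) false).length : Int) = (arr.length : Int) := by
      simp [PySem.List.length_sorted]
    rw [PySem.List.foldl_append_singleton_eq_map, PySem.List.foldl_append_singleton_eq_map]
    refine congrArg _ (List.map_congr_left fun q _ => ?_)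
    rw [aQuery_eq n q _ hn1 (by rw [hlen]; exact hn2),
        bQuery_eq n q _ ha hn1 (by rw [hlen]; exact hn2)]
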